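-- pv_equiv track=rewrite | github.com/Pororo-Study/Programmers-High-Kit | PCCP-모의고사/1회/[PCCP 모의고사 1] 4번_차하린.py | solution
-- ===== SOURCE A (Python) =====
-- import heapq
--
-- def solution(program):
--     # return 해야 하는 answer 배열은 길이가 11인 정수 배열
--     answer = [0] * 11
--     # 프로그램 점수, 호출된 시각, 실행 시간을 의미
--     # 호출된 시각 -> 점수 낮은 순으로 정렬
--     program.sort(key = lambda x : (x[1], x[0]))
--
--     heap = []   # 대기 중인 프로그램을 대기 큐에 추가
--     cur = 0     # 현재 시각?
--
--     idx = 0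
--     n = len(program)
--
--     while idx < n or heap:
--         while idx < n and program[idx][1] <= cur:
--             heapq.heappush(heap, (program[idx][0], program[idx][1], program[idx][2]))
--             idx += 1
--
--         if heap:
--             # 우선순위가 가장 높은 프로그램을 실행합니다.
--             priority, time, duration = heapq.heappop(heap)
--             if cur < time:
--                 cur = time
--             answer[priority] += cur - time
--             cur += duration
--         else:
--             # 대기 큐가 비어 있는 경우, 다음 프로그램 호출 시각으로 이동합니다.
--             if idx < n:
--                 cur = program[idx][1]
--
--     answer[0] = cur
--
--     return answer
-- ===== SOURCE B (Python) =====
-- def solution(program):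
--     # B: no sort, no heap, no index pointer; keeps the un-run programs as one pool
--     # and selects the next program directly each step.  `rel` is the release
--     # threshold: the highest clock value seen at a scheduling point, so a program
--     # is ready iff its call time <= rel. Does NOT sort `program` in place (A does).
--     answer = [0] * 11
--     items = [(x[0], x[1], x[2]) for x in program]
--     rel = 0
--     cur = 0
--     while items:
--         rel = max(rel, cur)
--         ready = [x for x in items if x[1] <= rel]
--         if not ready:
--             rel = min(x[1] for x in items)
--             cur = rel
--             ready = [x for x in items if x[1] <= rel]
--         p, t, d = min(ready)
--         items.remove((p, t, d))
--         if cur < t: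
--             cur = t
--         answer[p] += cur - t
--         cur += d
--     answer[0] = cur
--     return answer
-- ===== Notes on version B (the rewrite author's own statement) =====
-- stated objective: alternative
-- what changed: A's sort + binary heap + index pointer are replaced by direct selection: B keeps all un-run programs in one unsorted pool and each step picks the next program by a min-scan over those released by a running release-threshold clock, jumping the clock to the pool's minimum call time when none is released.
import Mathlib
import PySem

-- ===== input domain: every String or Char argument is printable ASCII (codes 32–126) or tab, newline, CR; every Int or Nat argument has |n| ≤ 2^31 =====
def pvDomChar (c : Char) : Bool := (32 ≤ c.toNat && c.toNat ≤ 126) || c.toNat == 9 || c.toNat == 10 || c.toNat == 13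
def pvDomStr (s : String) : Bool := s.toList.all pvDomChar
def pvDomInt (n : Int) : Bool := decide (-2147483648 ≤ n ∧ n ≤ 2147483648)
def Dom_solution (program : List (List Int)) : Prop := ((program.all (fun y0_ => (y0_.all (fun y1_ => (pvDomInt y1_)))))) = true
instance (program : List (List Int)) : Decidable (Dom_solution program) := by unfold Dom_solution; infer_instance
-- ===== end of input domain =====

-- B drops A's sort, heap and index pointer entirely: it keeps all un-run programs in one pool and
-- selects the next program directly each step via a release threshold; equivalence is about the
-- RETURN value — Python A sorts `program` in place (a side effect), B does not.

-- Python tuple comparison (p, t, d) < (p', t', d') : lexicographic on Int triples (exact)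
def tripLt (a b : Int × Int × Int) : Bool :=
  decide (a.1 < b.1 ∨ (a.1 = b.1 ∧ (a.2.1 < b.2.1 ∨ (a.2.1 = b.2.1 ∧ a.2.2 < b.2.2))))

-- (x[0], x[1], x[2]) of a row
def trip (r : List Int) : Int × Int × Int :=
  (PySem.List.pyGetD r 0 0, PySem.List.pyGetD r 1 0, PySem.List.pyGetD r 2 0)

-- ===== PORT A =====
-- heapq.heappush modelled as ordered insert (the heap's observable behaviour: pop returns the
-- minimum; equal triples are identical values, so the extraction order is exactly Python's)
def hpush : List (Int × Int × Int) → (Int × Int × Int) → List (Int × Int × Int)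
  | [], x => [x]
  | y :: ys, x => if tripLt y x then y :: hpush ys x else x :: y :: ys

-- inner `while idx < n and program[idx][1] <= cur: heappush(...)` (idx-scan as list consumption)
def pushA : List (List Int) → List (Int × Int × Int) → Int → List (List Int) × List (Int × Int × Int)
  | [], h, _ => ([], h)
  | r :: rs, h, cur =>
    if PySem.List.pyGetD r 1 0 ≤ cur then pushA rs (hpush h (trip r)) cur
    else (r :: rs, h)

-- outer `while idx < n or heap` (fuel 2*n+1 always suffices: ≤ n pops, ≤ n jumps, one exit test)
def loopA : Nat → List (List Int) → List (Int × Int × Int) → Int → List Int → Int × List Int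
  | 0, _, _, cur, ans => (cur, ans)
  | fuel+1, rest, heap, cur, ans =>
    if rest.isEmpty && heap.isEmpty then (cur, ans)
    else
      match pushA rest heap cur with
      | (rest', (p, t, d) :: hs) =>
        let cur2 := if cur < t then t else cur
        let ans2 := PySem.List.pySetD ans p (PySem.List.pyGetD ans p 0 + (cur2 - t))
        loopA fuel rest' hs (cur2 + d) ans2
      | (rest', []) =>
        let cur2 := match rest' with | r :: _ => PySem.List.pyGetD r 1 0 | [] => cur
        loopA fuel rest' [] cur2 ans

def solution (program : List (List Int)) : List Int :=
  let ps := PySem.List.sorted2 program (fun r => PySem.List.pyGetD r 1 0) (fun r => PySem.List.pyGetD r 0 0)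
  let res := loopA (2 * ps.length + 1) ps [] 0 (List.replicate 11 0)
  PySem.List.pySetD res.2 0 res.1

-- ===== PORT B =====
-- min(x[1] for x in items) as a running fold
def timeMin (t0 : Int) (ys : List (Int × Int × Int)) : Int :=
  ys.foldl (fun m x => if x.2.1 < m then x.2.1 else m) t0

-- min(ready): Python's min on tuples — first minimal element under lexicographic order
def minScan (x : Int × Int × Int) (ys : List (Int × Int × Int)) : Int × Int × Int :=
  ys.foldl (fun m y => if tripLt y m then y else m) x

-- `while items:` — one selection per iteration, so items.length iterations suffice
def loopB : Nat → List (Int × Int × Int) → Int → Int → List Int → Int × List Int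
  | 0, _, _, cur, ans => (cur, ans)
  | fuel+1, items, rel, cur, ans =>
    match items with
    | [] => (cur, ans)
    | z :: zs =>
      let rel1 := if rel < cur then cur else rel
      let ready1 := (z :: zs).filter (fun x => decide (x.2.1 ≤ rel1))
      let s :=
        if ready1.isEmpty then
          let m := timeMin z.2.1 zs
          (m, m, (z :: zs).filter (fun x => decide (x.2.1 ≤ m)))
        else (rel1, cur, ready1)
      match s.2.2 with
      | [] => (s.2.1, ans)   -- unreachable: Python's min of the empty list would raise, but `ready` is never empty
      | y :: ys =>
        let nxt := minScan y ys
        let cur2 := if s.2.1 < nxt.2.1 then nxt.2.1 else s.2.1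
        loopB fuel ((z :: zs).erase nxt) s.1 (cur2 + nxt.2.2)
          (PySem.List.pySetD ans nxt.1 (PySem.List.pyGetD ans nxt.1 0 + (cur2 - nxt.2.1)))

def solution_alt (program : List (List Int)) : List Int :=
  let items := program.map trip
  let res := loopB items.length items 0 0 (List.replicate 11 0)
  PySem.List.pySetD res.2 0 res.1

-- ===== PRECONDITION & SPEC =====
-- Pre_ excludes exactly the inputs where Python A raises: a row shorter than 3 (IndexError in the
-- sort key or in heappush) or a score outside -11..10 (IndexError in answer[priority]).
def Pre_solution (program : List (List Int)) : Prop :=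
  ∀ r ∈ program, 3 ≤ r.length ∧ -11 ≤ PySem.List.pyGetD r 0 0 ∧ PySem.List.pyGetD r 0 0 < 11
instance (program : List (List Int)) : Decidable (Pre_solution program) := by unfold Pre_solution; infer_instance
def pvWitness_solution : List (List Int) := [[2, 2, 6], [1, 10, 2], [3, 60, 1], [2, 10, 2]]
def Spec_solution (program : List (List Int)) (out : List Int) : Prop := out = solution_alt program
instance (program : List (List Int)) (out : List Int) : Decidable (Spec_solution program out) := by unfold Spec_solution; infer_instance

-- ===== CLAIM (what is proved, stated in full; the proofs are below) =====
def Claim_equal_solution : Prop := ∀ (program : List (List Int)), Dom_solution program → Pre_solution program → Spec_solution program (solution program)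

-- ===== LEMMAS AND PROOFS =====

lemma tripLt_irrefl (a : Int × Int × Int) : tripLt a a = false := by
  simp [tripLt]

lemma tripLt_asymm {a b : Int × Int × Int} (h : tripLt a b = true) : tripLt b a = false := by
  simp [tripLt] at *; omega

lemma tripLt_antisymm {a b : Int × Int × Int} (h1 : tripLt a b = false) (h2 : tripLt b a = false) : a = b := by
  simp [tripLt] at *
  obtain ⟨a1, a2, a3⟩ := a; obtain ⟨b1, b2, b3⟩ := b
  simp_all; omega

lemma tripLt_le_trans {a b c : Int × Int × Int} (h1 : tripLt b a = false) (h2 : tripLt c b = false) : tripLt c a = false := by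
  simp [tripLt] at *; omega

lemma tripLt_lt_trans {a b c : Int × Int × Int} (h1 : tripLt a b = true) (h2 : tripLt b c = true) : tripLt a c = true := by
  simp [tripLt] at *; omega

lemma hpush_perm (h : List (Int × Int × Int)) (x : Int × Int × Int) : (hpush h x).Perm (h ++ [x]) := by
  induction h with
  | nil => simp [hpush]
  | cons y ys ih =>
    by_cases hc : tripLt y x = true
    · simpa [hpush, hc] using ih.cons y
    · simp at hc
      simp only [hpush, hc, if_false, Bool.false_eq_true]
      simpa using (List.perm_middle (a := x) (l₁ := y :: ys) (l₂ := [])).symm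

lemma hpush_sorted {h : List (Int × Int × Int)} (x : Int × Int × Int)
    (hs : h.Pairwise (fun a b => tripLt b a = false)) :
    (hpush h x).Pairwise (fun a b => tripLt b a = false) := by
  induction h with
  | nil => simp [hpush]
  | cons y ys ih =>
    rw [List.pairwise_cons] at hs
    by_cases hc : tripLt y x = true
    · rw [hpush, if_pos hc, List.pairwise_cons]
      refine ⟨fun z hz => ?_, ih hs.2⟩
      have hz' : z ∈ ys ∨ z = x := by
        have := (hpush_perm ys x).mem_iff.mp hz; simpa using this
      rcases hz' with hz' | hz'
      · exact hs.1 z hz'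
      · subst hz'; exact tripLt_asymm hc
    · simp at hc
      rw [hpush, if_neg (by simp [hc]), List.pairwise_cons]
      refine ⟨fun z hz => ?_, List.pairwise_cons.mpr hs⟩
      rcases List.mem_cons.mp hz with hz | hz
      · subst hz; exact hc
      · exact tripLt_le_trans hc (hs.1 z hz)

-- the push phase splits `rest` at the first call time beyond `cur`
lemma pushA_spec (rest : List (List Int)) (heap : List (Int × Int × Int)) (cur : Int)
    (hs : heap.Pairwise (fun a b => tripLt b a = false)) :
    ∃ pre : List (List Int),
      rest = pre ++ (pushA rest heap cur).1 ∧
      (pushA rest heap cur).2.Perm (heap ++ pre.map trip) ∧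
      (∀ r ∈ pre, PySem.List.pyGetD r 1 0 ≤ cur) ∧
      (∀ r rs', (pushA rest heap cur).1 = r :: rs' → cur < PySem.List.pyGetD r 1 0) ∧
      (pushA rest heap cur).2.Pairwise (fun a b => tripLt b a = false) := by
  induction rest generalizing heap with
  | nil =>
    refine ⟨[], by simp [pushA], by simpa [pushA], by simp, ?_, by simpa [pushA]⟩
    intro r rs' h; simp [pushA] at h
  | cons r rs ih =>
    by_cases hc : PySem.List.pyGetD r 1 0 ≤ cur
    · obtain ⟨pre, h1, h2, h3, h4, h5⟩ := ih (hpush heap (trip r)) (hpush_sorted _ hs)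
      refine ⟨r :: pre, ?_, ?_, ?_, ?_, ?_⟩
      · simp only [pushA, if_pos hc]; rw [List.cons_append, ← h1]
      · simp only [pushA, if_pos hc]
        refine h2.trans ?_
        refine ((hpush_perm heap (trip r)).append_right (pre.map trip)).trans ?_
        simp
      · intro x hx; rcases List.mem_cons.mp hx with hx | hx
        · subst hx; exact hc
        · exact h3 x hx
      · simpa only [pushA, if_pos hc] using h4
      · simpa only [pushA, if_pos hc] using h5
    · refine ⟨[], by simp [pushA, hc], by simpa [pushA, hc], by simp, ?_, by simpa [pushA, hc]⟩
      intro x xs' h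
      simp only [pushA, hc, if_false] at h
      obtain ⟨hx, _⟩ := List.cons.inj h
      subst hx; omega

lemma minScan_spec (ys : List (Int × Int × Int)) (y : Int × Int × Int) :
    (minScan y ys = y ∨ minScan y ys ∈ ys) ∧
      ∀ z, (z = y ∨ z ∈ ys) → tripLt z (minScan y ys) = false := by
  induction ys generalizing y with
  | nil =>
    refine ⟨Or.inl rfl, fun z hz => ?_⟩
    rcases hz with hz | hz
    · subst hz; exact tripLt_irrefl _
    · simp at hz
  | cons b bs ih =>
    by_cases hc : tripLt b y = true
    · have hstep : minScan y (b :: bs) = minScan b bs := by simp [minScan, hc]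
      obtain ⟨ihm, ihmin⟩ := ih b
      rw [hstep]
      constructor
      · rcases ihm with hm | hm <;> simp [hm]
      · intro z hz
        have hacc : tripLt b (minScan b bs) = false := ihmin b (Or.inl rfl)
        rcases hz with hz | hz
        · subst hz
          by_cases hzm : tripLt z (minScan b bs) = true
          · exact absurd (tripLt_lt_trans hc hzm) (by simp [hacc])
          · simpa using hzm
        · rcases List.mem_cons.mp hz with hz | hz
          · subst hz; exact hacc
          · exact ihmin z (Or.inr hz)
    · have hc' : tripLt b y = false := by simpa using hc
      have hstep : minScan y (b :: bs) = minScan y bs := by simp [minScan, hc']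
      obtain ⟨ihm, ihmin⟩ := ih y
      rw [hstep]
      constructor
      · rcases ihm with hm | hm <;> simp [hm]
      · intro z hz
        rcases hz with hz | hz
        · subst hz; exact ihmin z (Or.inl rfl)
        · rcases List.mem_cons.mp hz with hz | hz
          · subst hz; exact tripLt_le_trans (ihmin y (Or.inl rfl)) hc'
          · exact ihmin z (Or.inr hz)

lemma minScan_eq_head {x : Int × Int × Int} {t : List (Int × Int × Int)}
    {y : Int × Int × Int} {ys : List (Int × Int × Int)}
    (hs : (x :: t).Pairwise (fun a b => tripLt b a = false))
    (hp : (x :: t).Perm (y :: ys)) : minScan y ys = x := by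
  obtain ⟨hmem, hmin⟩ := minScan_spec ys y
  have hxm : x = y ∨ x ∈ ys := by
    have : x ∈ y :: ys := hp.mem_iff.mp (by simp)
    simpa using this
  have h1 : tripLt x (minScan y ys) = false := hmin x hxm
  have hm_mem : minScan y ys ∈ x :: t := by
    apply hp.symm.mem_iff.mp
    rcases hmem with h | h
    · simp [h]
    · simp [h]
  have h2 : tripLt (minScan y ys) x = false := by
    rcases (List.mem_cons.mp hm_mem) with h | h
    · rw [h]; exact tripLt_irrefl x
    · exact (List.pairwise_cons.mp hs).1 _ h
  exact tripLt_antisymm h2 h1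

lemma timeMin_spec (ys : List (Int × Int × Int)) (t0 : Int) :
    (timeMin t0 ys = t0 ∨ ∃ x ∈ ys, timeMin t0 ys = x.2.1) ∧
      timeMin t0 ys ≤ t0 ∧ ∀ x ∈ ys, timeMin t0 ys ≤ x.2.1 := by
  induction ys generalizing t0 with
  | nil => exact ⟨Or.inl rfl, le_refl _, by simp⟩
  | cons b bs ih =>
    have hstep : timeMin t0 (b :: bs) = timeMin (if b.2.1 < t0 then b.2.1 else t0) bs := by
      simp [timeMin]
    obtain ⟨ihm, ihle, ihall⟩ := ih (if b.2.1 < t0 then b.2.1 else t0)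
    rw [hstep]
    refine ⟨?_, ?_, ?_⟩
    · rcases ihm with hm | ⟨x, hx, hm⟩
      · rw [hm]; split
        · exact Or.inr ⟨b, by simp, rfl⟩
        · exact Or.inl rfl
      · exact Or.inr ⟨x, by simp [hx], hm⟩
    · refine le_trans ihle ?_; split <;> omega
    · intro x hx
      rcases List.mem_cons.mp hx with hx | hx
      · subst hx; refine le_trans ihle ?_; split <;> omega
      · exact ihall x hx

-- insertion sort produces a list pairwise-nonincreasing under the strict `before` order
lemma insertBy_pairwise (before : List Int → List Int → Bool)
    (htr : ∀ a b c, before a b = true → before b c = true → before a c = true)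
    (has : ∀ a b, before a b = true → before b a = false)
    (x : List Int) (acc : List (List Int))
    (h : acc.Pairwise (fun a b => before b a = false)) :
    (PySem.List.insertBy before x acc).Pairwise (fun a b => before b a = false) := by
  induction acc with
  | nil => simp [PySem.List.insertBy]
  | cons y ys ih =>
    rw [List.pairwise_cons] at h
    by_cases hc : before x y = true
    · rw [PySem.List.insertBy, if_pos hc, List.pairwise_cons]
      refine ⟨fun z hz => ?_, List.pairwise_cons.mpr h⟩
      rcases List.mem_cons.mp hz with hz | hz
      · subst hz; exact has _ _ hc
      · by_cases hzx : before z x = true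
        · exact absurd (htr _ _ _ hzx hc) (by simp [h.1 z hz])
        · simpa using hzx
    · rw [PySem.List.insertBy, if_neg hc, List.pairwise_cons]
      refine ⟨fun z hz => ?_, ih h.2⟩
      have hz' : z = x ∨ z ∈ ys := (PySem.List.mem_insertBy _ _ _ _).mp hz
      rcases hz' with hz' | hz'
      · subst hz'; simpa using hc
      · exact h.1 z hz'

lemma foldl_insertBy_pairwise (before : List Int → List Int → Bool)
    (htr : ∀ a b c, before a b = true → before b c = true → before a c = true)
    (has : ∀ a b, before a b = true → before b a = false)
    (xs acc : List (List Int))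
    (h : acc.Pairwise (fun a b => before b a = false)) :
    (xs.foldl (fun acc x => PySem.List.insertBy before x acc) acc).Pairwise
      (fun a b => before b a = false) := by
  induction xs generalizing acc with
  | nil => simpa using h
  | cons x xs ih => exact ih _ (insertBy_pairwise before htr has x acc h)

-- the sorted program list is nondecreasing in call time
lemma sorted2_t_pairwise (xs : List (List Int)) :
    (PySem.List.sorted2 xs (fun r => PySem.List.pyGetD r 1 0) (fun r => PySem.List.pyGetD r 0 0)).Pairwise
      (fun a b => PySem.List.pyGetD a 1 0 ≤ PySem.List.pyGetD b 1 0) := by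
  have h := foldl_insertBy_pairwise
    (fun a b => decide (PySem.List.pyGetD a 1 0 < PySem.List.pyGetD b 1 0) ||
      (!decide (PySem.List.pyGetD b 1 0 < PySem.List.pyGetD a 1 0) &&
        decide (PySem.List.pyGetD a 0 0 < PySem.List.pyGetD b 0 0)))
    (by intro a b c h1 h2; simp at *; omega)
    (by intro a b h1; simp at *; omega)
    xs [] (by simp)
  refine List.Pairwise.imp ?_ h
  intro a b hab; simp at hab; omega

lemma trip_t (r : List Int) : (trip r).2.1 = PySem.List.pyGetD r 1 0 := rfl

-- ===== the main simulation lemma =====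
-- Invariant, at the top of A's outer loop vs. B's loop: `wb` is (a permutation of) all un-run
-- programs; `heap` holds exactly those with call time ≤ rel (B's release threshold), `rest` the
-- later ones in call-time order.
lemma main_loop (N : Nat) : ∀ (fA fB : Nat) (rest : List (List Int))
    (heap wb : List (Int × Int × Int)) (rel cur : Int) (ans : List Int),
    rest.length + heap.length = N →
    2 * N ≤ fA → N ≤ fB →
    rest.Pairwise (fun a b => PySem.List.pyGetD a 1 0 ≤ PySem.List.pyGetD b 1 0) →
    heap.Pairwise (fun a b => tripLt b a = false) →
    (∀ x ∈ heap, x.2.1 ≤ rel) →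
    (rel ≤ cur ∨ ∀ r ∈ rest, rel < PySem.List.pyGetD r 1 0) →
    wb.Perm (heap ++ rest.map trip) →
    loopA fA rest heap cur ans = loopB fB wb rel cur ans := by
  induction N using Nat.strong_induction_on with
  | _ N ih =>
  intro fA fB rest heap wb rel cur ans hN hfA hfB hrs hhs hhrel hrc hp
  rcases Nat.eq_zero_or_pos N with hN0 | hNpos
  · -- nothing left: both loops stop with (cur, ans)
    subst hN0
    rcases rest with _ | ⟨r, rs⟩
    · rcases heap with _ | ⟨h0, hs0⟩
      · have hw : wb = [] := by simpa using hp
        subst hw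
        cases fA <;> cases fB <;> simp [loopA, loopB]
      · simp at hN
    · simp at hN
  · obtain ⟨fa, rfl⟩ : ∃ fa, fA = fa + 1 := ⟨fA - 1, by omega⟩
    obtain ⟨fb, rfl⟩ : ∃ fb, fB = fb + 1 := ⟨fB - 1, by omega⟩
    have hne : (rest.isEmpty && heap.isEmpty) = false := by
      by_contra hcon
      rw [Bool.not_eq_false, Bool.and_eq_true, List.isEmpty_iff, List.isEmpty_iff] at hcon
      obtain ⟨h1, h2⟩ := hcon; subst h1; subst h2; simp at hN; omega
    obtain ⟨pre, hsplit, hperm, hpre, hhead, hsort⟩ := pushA_spec rest heap cur hhs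
    rcases hPA : pushA rest heap cur with ⟨rest', heap'⟩
    rw [hPA] at hsplit hperm hhead hsort
    dsimp only at hsplit hperm hhead hsort
    have hrel_le : rel ≤ (if rel < cur then cur else rel) := by split <;> omega
    have hcur_le : cur ≤ (if rel < cur then cur else rel) := by split <;> omega
    have E2 : ∀ x ∈ heap', x.2.1 ≤ (if rel < cur then cur else rel) := by
      intro x hx
      rcases List.mem_append.mp (hperm.mem_iff.mp hx) with hx' | hx'
      · exact le_trans (hhrel x hx') hrel_le
      · obtain ⟨r, hr, rfl⟩ := List.mem_map.mp hx'
        rw [trip_t]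
        exact le_trans (hpre r hr) hcur_le
    have hrest'_pw : rest'.Pairwise (fun a b => PySem.List.pyGetD a 1 0 ≤ PySem.List.pyGetD b 1 0) := by
      have h := hsplit ▸ hrs
      exact (List.pairwise_append.mp h).2.1
    have Ecur : ∀ r ∈ rest', cur < PySem.List.pyGetD r 1 0 := by
      intro r hr
      rcases hre : rest' with _ | ⟨r0, rs0⟩
      · rw [hre] at hr; simp at hr
      · have h0 := hhead r0 rs0 hre
        rw [hre] at hr hrest'_pw
        rcases List.mem_cons.mp hr with hr1 | hr1
        · subst hr1; exact h0
        · exact lt_of_lt_of_le h0 ((List.pairwise_cons.mp hrest'_pw).1 r hr1)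
    have E3 : ∀ r ∈ rest', (if rel < cur then cur else rel) < PySem.List.pyGetD r 1 0 := by
      intro r hr
      rcases hrc with h | h
      · have := Ecur r hr; split <;> omega
      · have h1 := h r (by rw [hsplit]; exact List.mem_append_right _ hr)
        have h2 := Ecur r hr
        split <;> omega
    have hp2 : wb.Perm (heap' ++ rest'.map trip) := by
      refine hp.trans ?_
      have h1 : heap ++ rest.map trip = (heap ++ pre.map trip) ++ rest'.map trip := by
        rw [hsplit]; simp
      rw [h1]
      exact (hperm.append_right _).symm
    rcases heap' with _ | ⟨⟨p, t, d⟩, hs1⟩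
    · -- A jumps to the next call time; B's first `ready` is empty and it re-releases at min t
      have hnil0 : heap ++ pre.map trip = [] := hperm.symm.eq_nil
      simp at hnil0
      obtain ⟨hheap0, hpre0⟩ := hnil0
      subst hheap0; subst hpre0
      simp only [List.nil_append] at hsplit hperm hp2
      subst hsplit
      rcases rest with _ | ⟨r0, rs0⟩
      · simp at hN; omega
      rcases wb with _ | ⟨z, zs⟩
      · exfalso; have := hp2.length_eq; simp at this
      -- A side: first iteration is the jump
      simp only [loopA, hne, Bool.false_eq_true, if_false, hPA]
      obtain ⟨fa', rfl⟩ : ∃ fa', fa = fa' + 1 := ⟨fa - 1, by omega⟩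
      obtain ⟨pre2, hsplit2, hperm2, hpre2, hhead2, hsort2⟩ :=
        pushA_spec (r0 :: rs0) [] (PySem.List.pyGetD r0 1 0) (by simp)
      rcases hPA2 : pushA (r0 :: rs0) [] (PySem.List.pyGetD r0 1 0) with ⟨rest2, heap2⟩
      rw [hPA2] at hsplit2 hperm2 hhead2 hsort2
      dsimp only at hsplit2 hperm2 hhead2 hsort2
      simp only [List.nil_append] at hperm2
      have hpre2ne : pre2 ≠ [] := by
        intro h0
        rw [h0] at hsplit2
        simp at hsplit2
        have := hhead2 r0 rs0 hsplit2.symm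
        omega
      rcases heap2 with _ | ⟨⟨p, t, d⟩, hs2⟩
      · exfalso
        have := hperm2.length_eq
        simp at this
        exact hpre2ne (by cases pre2 with | nil => rfl | cons a l => simp at this)
      simp only [loopA, List.isEmpty_cons, Bool.false_and, Bool.false_eq_true, if_false, hPA2]
      -- B side: empty ready, jump to min call time
      have hready1 : (z :: zs).filter (fun x => decide (x.2.1 ≤ (if rel < cur then cur else rel))) = [] := by
        apply List.filter_eq_nil_iff.mpr
        intro a ha
        have ha' := hp2.mem_iff.mp ha
        simp only [List.nil_append] at ha'
        obtain ⟨r, hr, rfl⟩ := List.mem_map.mp ha'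
        have := E3 r hr
        simp [trip]; omega
      have hr0_min : ∀ x ∈ z :: zs, PySem.List.pyGetD r0 1 0 ≤ x.2.1 := by
        intro x hx
        have hx' := hp2.mem_iff.mp hx
        simp only [List.nil_append] at hx'
        obtain ⟨r, hr, rfl⟩ := List.mem_map.mp hx'
        rw [trip_t]
        rcases List.mem_cons.mp hr with hr1 | hr1
        · subst hr1; exact le_refl _
        · exact (List.pairwise_cons.mp hrs).1 r hr1
      have hm : timeMin z.2.1 zs = PySem.List.pyGetD r0 1 0 := by
        obtain ⟨hmem, hle0, hall⟩ := timeMin_spec zs z.2.1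
        have h1 : PySem.List.pyGetD r0 1 0 ≤ timeMin z.2.1 zs := by
          rcases hmem with hm0 | ⟨x, hx, hm0⟩
          · rw [hm0]; exact hr0_min z (by simp)
          · rw [hm0]; exact hr0_min x (by simp [hx])
        have h2 : timeMin z.2.1 zs ≤ PySem.List.pyGetD r0 1 0 := by
          have hmemw : trip r0 ∈ z :: zs := hp2.symm.mem_iff.mp (by simp)
          rcases List.mem_cons.mp hmemw with h | h
          · rw [← trip_t, h]; exact hle0
          · have := hall _ h; rwa [trip_t] at this
        omega
      have hrest2_pw : rest2.Pairwise (fun a b => PySem.List.pyGetD a 1 0 ≤ PySem.List.pyGetD b 1 0) := by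
        have h := hsplit2 ▸ hrs
        exact (List.pairwise_append.mp h).2.1
      have hrest2_gt : ∀ r ∈ rest2, PySem.List.pyGetD r0 1 0 < PySem.List.pyGetD r 1 0 := by
        intro r hr
        rcases hre : rest2 with _ | ⟨r1, rs1⟩
        · rw [hre] at hr; simp at hr
        · have h0 := hhead2 r1 rs1 hre
          rw [hre] at hr hrest2_pw
          rcases List.mem_cons.mp hr with hr1 | hr1
          · subst hr1; exact h0
          · exact lt_of_lt_of_le h0 ((List.pairwise_cons.mp hrest2_pw).1 r hr1)
      have hp3 : (z :: zs).Perm (((p, t, d) :: hs2) ++ rest2.map trip) := by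
        refine hp2.trans ?_
        have h1 : (r0 :: rs0).map trip = pre2.map trip ++ rest2.map trip := by
          rw [hsplit2]; simp
        rw [h1]
        exact (hperm2.append_right _).symm
      have hfil2 : ((z :: zs).filter (fun x => decide (x.2.1 ≤ PySem.List.pyGetD r0 1 0))).Perm
          ((p, t, d) :: hs2) := by
        have hall2 : ∀ a ∈ (p, t, d) :: hs2,
            (fun x : Int × Int × Int => decide (x.2.1 ≤ PySem.List.pyGetD r0 1 0)) a = true := by
          intro a ha
          obtain ⟨r, hr, rfl⟩ := List.mem_map.mp (hperm2.mem_iff.mp ha)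
          have := hpre2 r hr
          simp [trip]; omega
        have hnone2 : ∀ a ∈ rest2.map trip,
            ¬ (fun x : Int × Int × Int => decide (x.2.1 ≤ PySem.List.pyGetD r0 1 0)) a = true := by
          intro a ha
          obtain ⟨r, hr, rfl⟩ := List.mem_map.mp ha
          have := hrest2_gt r hr
          simp [trip]; omega
        have hfeq : (((p, t, d) :: hs2) ++ rest2.map trip).filter
            (fun x => decide (x.2.1 ≤ PySem.List.pyGetD r0 1 0)) = (p, t, d) :: hs2 := by
          rw [List.filter_append, List.filter_eq_self.mpr hall2,
            List.filter_eq_nil_iff.mpr hnone2, List.append_nil]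
        have h := hp3.filter (fun x => decide (x.2.1 ≤ PySem.List.pyGetD r0 1 0))
        rwa [hfeq] at h
      rcases hflt2 : (z :: zs).filter (fun x => decide (x.2.1 ≤ PySem.List.pyGetD r0 1 0)) with _ | ⟨w, ws⟩
      · exfalso; rw [hflt2] at hfil2; have := hfil2.length_eq; simp at this
      rw [hflt2] at hfil2
      have hmin : minScan w ws = (p, t, d) := minScan_eq_head hsort2 hfil2.symm
      have hheap2mem : ∀ x ∈ ((p, t, d) :: hs2), x.2.1 ≤ PySem.List.pyGetD r0 1 0 := by
        intro x hx
        obtain ⟨r, hr, rfl⟩ := List.mem_map.mp (hperm2.mem_iff.mp hx)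
        rw [trip_t]
        exact hpre2 r hr
      have herase : ((z :: zs).erase (p, t, d)).Perm (hs2 ++ rest2.map trip) := by
        have h := hp3.erase (p, t, d)
        simpa [List.erase_cons_head] using h
      simp only [loopB, hready1, hm, hflt2, List.isEmpty_nil, List.isEmpty_cons, if_true,
        Bool.false_eq_true, if_false, hmin]
      -- lengths for the recursive call
      have hlen2 := hperm2.length_eq
      simp at hlen2
      have hlensplit : (r0 :: rs0).length = pre2.length + rest2.length := by
        rw [hsplit2]; simp
      have hNlen : rest2.length + hs2.length + 1 = N := by
        simp at hN hlensplit; omega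
      refine ih (rest2.length + hs2.length) (by omega) fa' fb rest2 hs2 _ _ _ _ rfl
        (by omega) (by omega) hrest2_pw ((List.pairwise_cons.mp hsort2).2)
        (fun x hx => hheap2mem x (List.mem_cons_of_mem _ hx)) (Or.inr hrest2_gt) herase
    · -- regular pop: the minimum of B's ready pool is exactly A's heap head
      rcases wb with _ | ⟨z, zs⟩
      · exfalso; have := hp2.length_eq; simp at this
      have hfil : ((z :: zs).filter (fun x => decide (x.2.1 ≤ (if rel < cur then cur else rel)))).Perm
          ((p, t, d) :: hs1) := by
        have hall1 : ∀ a ∈ (p, t, d) :: hs1,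
            (fun x : Int × Int × Int => decide (x.2.1 ≤ (if rel < cur then cur else rel))) a = true := by
          intro a ha; simpa using E2 a ha
        have hnone1 : ∀ a ∈ rest'.map trip,
            ¬ (fun x : Int × Int × Int => decide (x.2.1 ≤ (if rel < cur then cur else rel))) a = true := by
          intro a ha
          obtain ⟨r, hr, rfl⟩ := List.mem_map.mp ha
          have := E3 r hr
          simp [trip]; omega
        have hfeq : (((p, t, d) :: hs1) ++ rest'.map trip).filter
            (fun x => decide (x.2.1 ≤ (if rel < cur then cur else rel))) = (p, t, d) :: hs1 := by
          rw [List.filter_append, List.filter_eq_self.mpr hall1,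
            List.filter_eq_nil_iff.mpr hnone1, List.append_nil]
        have h := hp2.filter (fun x => decide (x.2.1 ≤ (if rel < cur then cur else rel)))
        rwa [hfeq] at h
      rcases hflt : (z :: zs).filter (fun x => decide (x.2.1 ≤ (if rel < cur then cur else rel))) with _ | ⟨w, ws⟩
      · exfalso; rw [hflt] at hfil; have := hfil.length_eq; simp at this
      rw [hflt] at hfil
      have hmin : minScan w ws = (p, t, d) := minScan_eq_head hsort hfil.symm
      have herase : ((z :: zs).erase (p, t, d)).Perm (hs1 ++ rest'.map trip) := by
        have h := hp2.erase (p, t, d)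
        simpa [List.erase_cons_head] using h
      simp only [loopA, hne, Bool.false_eq_true, if_false, hPA]
      simp only [loopB, hflt, List.isEmpty_cons, Bool.false_eq_true, if_false, hmin]
      have hlen1 := hperm.length_eq
      simp at hlen1
      have hlensplit : rest.length = pre.length + rest'.length := by
        rw [hsplit]; simp
      have hNlen : rest'.length + hs1.length + 1 = N := by omega
      refine ih (rest'.length + hs1.length) (by omega) fa fb rest' hs1 _ _ _ _ rfl
        (by omega) (by omega) hrest'_pw ((List.pairwise_cons.mp hsort).2)
        (fun x hx => E2 x (List.mem_cons_of_mem _ hx)) (Or.inr E3) herase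

-- ===== VERDICT (by name: the statement is the Claim_ definition above) =====
theorem solution_spec : Claim_equal_solution := by
  intro program _ _
  unfold Spec_solution
  simp only [solution, solution_alt]
  have hperm := PySem.List.sorted2_perm program (fun r => PySem.List.pyGetD r 1 0)
    (fun r => PySem.List.pyGetD r 0 0) false
  rw [main_loop (PySem.List.sorted2 program (fun r => PySem.List.pyGetD r 1 0)
        (fun r => PySem.List.pyGetD r 0 0)).length
      (2 * (PySem.List.sorted2 program (fun r => PySem.List.pyGetD r 1 0)
        (fun r => PySem.List.pyGetD r 0 0)).length + 1)
      (program.map trip).length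
      _ [] (program.map trip) 0 0 (List.replicate 11 0)
      (by simp) (by omega) (by simp [hperm.length_eq])
      (sorted2_t_pairwise program) (by simp) (by simp) (Or.inl (le_refl 0))
      (by simpa using (hperm.map trip).symm)]
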